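-- pv_equiv track=rewrite | github.com/TRIA/P4 | dataplane/bmodel/efcp_router/bm_tests/tests/cli/bti/batch_test_base.py | socket_port_get
-- ===== SOURCE A (Python) =====
-- def socket_port_get(argv):
--     """
--     Socket port number
--     """
--     socket_port = 9090
--
--     for idx in range(1, len(argv), 2):
--         argstr = argv[idx]
--         if argstr == "-port" and idx+1 < len(argv):
--             port = argv[idx+1]
--             try:
--                 socket_port = int(port)
--             except ValueError:
--                 pass
--
--     return socket_port
-- ===== SOURCE B (Python) =====
-- def socket_port_get(argv):
--     """
--     Socket port number
--     """
--     pairs = list(zip(argv[1::2], argv[2::2]))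
--     for flag, val in reversed(pairs):
--         if flag == "-port":
--             try:
--                 return int(val)
--             except ValueError:
--                 continue
--     return 9090
-- ===== Notes on version B (the rewrite author's own statement) =====
-- stated objective: alternative
-- what changed: B zips the odd-index slice (flags) with the even-index slice (values) into pairs and does a backward scan with early return on the first '-port' pair whose value parses, instead of A's forward stride-2 index loop that keeps overwriting an accumulator.
import Mathlib
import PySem

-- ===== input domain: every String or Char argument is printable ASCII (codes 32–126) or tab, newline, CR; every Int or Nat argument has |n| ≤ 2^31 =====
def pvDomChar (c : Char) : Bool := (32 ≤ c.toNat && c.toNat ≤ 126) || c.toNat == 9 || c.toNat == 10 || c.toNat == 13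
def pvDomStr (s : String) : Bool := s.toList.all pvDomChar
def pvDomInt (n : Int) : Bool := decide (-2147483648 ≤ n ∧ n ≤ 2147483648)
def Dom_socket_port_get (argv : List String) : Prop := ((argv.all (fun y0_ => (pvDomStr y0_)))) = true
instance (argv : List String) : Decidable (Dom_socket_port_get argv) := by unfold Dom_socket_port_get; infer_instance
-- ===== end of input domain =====

-- B zips the odd-index slice with the even-index slice into (flag, value) pairs and scans
-- them backward, returning at the first '-port' pair whose value parses (9090 if none),
-- instead of A's forward stride-2 index loop with an overwriting accumulator (objective: alternative).


-- ===== PORT A =====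
-- literal transliteration of A: fold over range(1, len(argv), 2) keeping a running socket_port
def socket_port_get (argv : List String) : Int :=
  (PySem.List.pyRange 1 (PySem.List.len argv) 2).foldl
    (fun socket_port idx =>
      let argstr := PySem.List.pyGetD argv idx ""
      if argstr = "-port" ∧ idx + 1 < PySem.List.len argv then
        match PySem.Int.ofStr? (PySem.List.pyGetD argv (idx + 1) "") with
        | some v => v
        | none => socket_port
      else socket_port)
    9090

-- ===== PORT B =====
-- the 'for flag, val in reversed(pairs): …' loop with its early returns, as structural recursion
def pvPickRev : List (String × String) → Int
  | [] => 9090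
  | (flag, val) :: rest =>
      if flag = "-port" then
        match PySem.Int.ofStr? val with
        | some v => v
        | none => pvPickRev rest
      else pvPickRev rest

-- literal transliteration of B: zip argv[1::2] with argv[2::2], scan the reversed pair list
-- (slice? returns some here since the step 2 is nonzero; .getD [] only discharges the option)
def socket_port_get_alt (argv : List String) : Int :=
  let pairs := ((PySem.List.slice? argv (some 1) none 2).getD []).zip
               ((PySem.List.slice? argv (some 2) none 2).getD [])
  pvPickRev pairs.reverse

-- ===== PRECONDITION & SPEC =====
def Spec_socket_port_get (argv : List String) (out : Int) : Prop := out = socket_port_get_alt argv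
instance (argv : List String) (out : Int) : Decidable (Spec_socket_port_get argv out) := by unfold Spec_socket_port_get; infer_instance

-- ===== CLAIM (what is proved, stated in full; the proofs are below) =====
def Claim_equal_socket_port_get : Prop := ∀ (argv : List String), Dom_socket_port_get argv → Spec_socket_port_get argv (socket_port_get argv)

-- ===== LEMMAS AND PROOFS =====

-- the pair-filtering function both sides are characterised by
def pvG (p : String × String) : Option Int :=
  if p.1 = "-port" then PySem.Int.ofStr? p.2 else none

-- keep-last fold over optional updates = last collected value (or the start value)
lemma foldl_getD_filterMap {α β : Type} (f : α → Option β) (l : List α) (s : β) :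
    l.foldl (fun s i => (f i).getD s) s = (l.filterMap f).getLastD s := by
  induction l generalizing s with
  | nil => rfl
  | cons i t ih =>
    simp only [List.foldl_cons, List.filterMap_cons]
    cases h : f i with
    | none => simp only [Option.getD_none]; exact ih s
    | some v => simp only [Option.getD_some, List.getLastD_cons]; exact ih v

-- backward first-match scan = head of the filtered list (or the default)
lemma pvPickRev_eq (l : List (String × String)) :
    pvPickRev l = ((l.filterMap pvG).head?).getD 9090 := by
  induction l with
  | nil => rfl
  | cons p t ih =>
    obtain ⟨flag, val⟩ := p
    simp only [pvPickRev, List.filterMap_cons, pvG]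
    by_cases hf : flag = "-port"
    · simp only [hf]
      cases h : PySem.Int.ofStr? val with
      | none => simpa using ih
      | some v => simp
    · simpa [hf] using ih

-- argv[a::2] (a ≥ 1 a Nat) as an explicit map over a range of pair indices
lemma slice2_char (xs : List String) (a : ℕ) (ha : 1 ≤ a) :
    (PySem.List.slice? xs (some (a : Int)) none 2).getD []
      = (List.range ((xs.length - a + 1) / 2)).map (fun k => xs.getD (a + 2 * k) "") := by
  unfold PySem.List.slice? PySem.List.sliceIndices
  norm_num
  simp only [if_neg (show ¬((a : Int) < 0) by omega)]
  by_cases h : a < xs.length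
  · rw [min_eq_left (by exact_mod_cast Nat.le_of_lt h)]
    rw [if_pos (by exact_mod_cast h)]
    have hcnt : (((xs.length : Int) - a + 2 - 1) / 2).toNat = (xs.length - a + 1) / 2 := by
      omega
    rw [hcnt, ← List.filterMap_eq_map]
    apply List.filterMap_congr
    intro k hk
    rw [List.mem_range] at hk
    have hidx : ((a : Int) + 2 * (k : Int)).toNat = a + 2 * k := by omega
    have hin : a + 2 * k < xs.length := by omega
    simp only [Function.comp, hidx, List.getElem?_eq_getElem hin, Option.getD_some]
  · rw [min_eq_right (by exact_mod_cast Nat.le_of_not_lt h)]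
    rw [if_neg (by omega)]
    have : (xs.length - a + 1) / 2 = 0 := by omega
    simp [this]

-- the zipped pair list, elementwise
lemma pairs_char (argv : List String) :
    (((PySem.List.slice? argv (some 1) none 2).getD []).zip
       ((PySem.List.slice? argv (some 2) none 2).getD []))
      = (List.range ((argv.length - 1) / 2)).map
          (fun k => (argv.getD (1 + 2 * k) "", argv.getD (2 + 2 * k) "")) := by
  have h1 := slice2_char argv 1 (by norm_num)
  have h2 := slice2_char argv 2 (by norm_num)
  norm_num at h1 h2
  rw [h1, h2]
  have hc : (argv.length - 2 + 1) / 2 ≤ (argv.length - 1 + 1) / 2 := by omega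
  apply List.ext_getElem
  · simp only [List.length_zip, List.length_map, List.length_range]
    omega
  · intro i h1 h2
    simp only [List.length_zip, List.length_map, List.length_range] at h1
    rw [List.getElem_zip]
    simp only [List.getElem_map, List.getElem_range]
    simp [List.getD]

-- filterMap over A's odd-index range = filterMap over the pair list
lemma filterA_eq (argv : List String) :
    ((PySem.List.pyRange 1 (PySem.List.len argv) 2).filterMap
      (fun idx =>
        if PySem.List.pyGetD argv idx "" = "-port" ∧ idx + 1 < PySem.List.len argv then
          PySem.Int.ofStr? (PySem.List.pyGetD argv (idx + 1) "")
        else none))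
    = ((List.range ((argv.length - 1) / 2)).map
        (fun k => (argv.getD (1 + 2 * k) "", argv.getD (2 + 2 * k) ""))).filterMap pvG := by
  rw [PySem.List.pyRange_of_pos 1 (PySem.List.len argv) (by norm_num)]
  rw [List.filterMap_map, List.filterMap_map]
  set n := argv.length with hn
  have hlen : PySem.List.len argv = (n : Int) := rfl
  have hcnt : (if (1 : Int) < PySem.List.len argv then
      ((PySem.List.len argv - 1 + 2 - 1) / 2).toNat else 0) = n / 2 := by
    rw [hlen]
    by_cases h1n : (1 : Int) < (n : Int)
    · rw [if_pos h1n]; omega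
    · rw [if_neg h1n]; omega
  rw [hcnt]
  -- pointwise value of A's function on an in-pair-range index k
  have hpt : ∀ k, k < (n - 1) / 2 →
      ((fun idx =>
          if PySem.List.pyGetD argv idx "" = "-port" ∧ idx + 1 < PySem.List.len argv then
            PySem.Int.ofStr? (PySem.List.pyGetD argv (idx + 1) "") else none)
        ((1 : Int) + 2 * (k : ℕ)))
      = pvG (argv.getD (1 + 2 * k) "", argv.getD (2 + 2 * k) "") := by
    intro k hk
    beta_reduce
    have h1 : ((1 : Int) + 2 * (k : ℕ)) = ((1 + 2 * k : ℕ) : Int) := by push_cast; ring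
    rw [h1, PySem.List.pyGetD_natCast]
    have h2 : (((1 + 2 * k : ℕ) : Int)) + 1 = ((2 + 2 * k : ℕ) : Int) := by push_cast; ring
    rw [h2, PySem.List.pyGetD_natCast]
    have hlt : (((2 + 2 * k : ℕ) : Int)) < PySem.List.len argv := by
      rw [hlen]; push_cast; omega
    simp only [pvG, eq_true hlt, and_true]
  by_cases hsplit : n / 2 = (n - 1) / 2
  · rw [hsplit]
    apply List.filterMap_congr
    intro k hk
    rw [List.mem_range] at hk
    simpa [Function.comp] using hpt k hk
  · -- n even and positive: one extra trailing index, filtered to none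
    have hvn : n / 2 = (n - 1) / 2 + 1 := by omega
    rw [hvn, List.range_succ, List.filterMap_append]
    have hge : ¬ ((1 : Int) + 2 * (((n - 1) / 2 : ℕ) : Int) + 1 < PySem.List.len argv) := by
      rw [hlen]; push_cast; omega
    have htail : List.filterMap
        ((fun idx =>
            if PySem.List.pyGetD argv idx "" = "-port" ∧ idx + 1 < PySem.List.len argv then
              PySem.Int.ofStr? (PySem.List.pyGetD argv (idx + 1) "") else none) ∘
          fun k : ℕ => (1 : Int) + 2 * (k : ℕ)) [(n - 1) / 2] = [] := by
      simp only [List.filterMap_cons, List.filterMap_nil, Function.comp_apply]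
      rw [if_neg (fun hc => hge hc.2)]
    rw [htail, List.append_nil]
    apply List.filterMap_congr
    intro k hk
    rw [List.mem_range] at hk
    simpa [Function.comp] using hpt k hk

-- ===== VERDICT (by name: the statement is the Claim_ definition above) =====
theorem socket_port_get_spec : Claim_equal_socket_port_get := by
  intro argv _
  unfold Spec_socket_port_get socket_port_get socket_port_get_alt
  simp only
  rw [pairs_char, pvPickRev_eq, List.filterMap_reverse, List.head?_reverse, ← filterA_eq]
  rw [show (fun (socket_port : Int) (idx : Int) =>
      let argstr := PySem.List.pyGetD argv idx ""
      if argstr = "-port" ∧ idx + 1 < PySem.List.len argv then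
        match PySem.Int.ofStr? (PySem.List.pyGetD argv (idx + 1) "") with
        | some v => v
        | none => socket_port
      else socket_port)
    = (fun (s : Int) (idx : Int) =>
        ((fun idx =>
          if PySem.List.pyGetD argv idx "" = "-port" ∧ idx + 1 < PySem.List.len argv then
            PySem.Int.ofStr? (PySem.List.pyGetD argv (idx + 1) "")
          else none) idx).getD s) from by
      funext s idx
      simp only
      split
      · cases PySem.Int.ofStr? (PySem.List.pyGetD argv (idx + 1) "") <;> rfl
      · rfl]
  rw [foldl_getD_filterMap]
  rw [List.getLastD_eq_getLast?]
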